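-- pv_equiv track=rewrite | github.com/Mikisbell/conference-shm | tools/autoresearch.py | select_room
-- ===== SOURCE A (Python) =====
-- def select_room(rooms: dict, settings: dict, history: list,
--                 target_room: str = None) -> str:
--     """Select next room using priority + consecutive failure avoidance."""
--     if target_room and target_room in rooms:
--         return target_room
--
--     max_failures = 5
--     sorted_rooms = sorted(rooms.items(),
--                           key=lambda x: x[1].get("priority", 99))
--
--     for room_name, room_cfg in sorted_rooms:
--         # Check consecutive failures
--         room_history = [r for r in history if r.get("room") == room_name]
--         recent = room_history[-max_failures:] if room_history else []
--         if len(recent) >= max_failures and all(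
--             r.get("status") in ("discard", "crash", "timeout")
--             for r in recent
--         ):
--             continue  # Skip this room
--         return room_name
--
--     return None  # All rooms exhausted
-- ===== SOURCE B (Python) =====
-- def _blocked(room_name, history, max_failures=5):
--     """Walk history backwards; room is blocked iff its last max_failures
--     entries exist and all ended in discard/crash/timeout."""
--     seen = 0
--     for r in reversed(history):
--         if r.get("room") == room_name:
--             if r.get("status") not in ("discard", "crash", "timeout"):
--                 return False
--             seen += 1
--             if seen == max_failures:
--                 return True
--     return False
--
--
-- def select_room(rooms: dict, settings: dict, history: list,
--                 target_room: str = None) -> str: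
--     """Select next room: minimum-priority non-blocked room in one pass."""
--     if target_room and target_room in rooms:
--         return target_room
--
--     best_name = None
--     best_prio = None
--     for name, cfg in rooms.items():
--         if _blocked(name, history):
--             continue
--         prio = cfg.get("priority", 99)
--         if best_prio is None or prio < best_prio:
--             best_name, best_prio = name, prio
--     return best_name
-- ===== Notes on version B (the rewrite author's own statement) =====
-- stated objective: alternative
-- what changed: B replaces A's sort-then-scan (stable sort by priority, then return the first room whose last 5 history entries are not all failures) by a single pass over rooms keeping the best strictly-smaller-priority non-blocked room, and checks blockedness by one backward walk over the history with early exit instead of filter-then-slice.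
import Mathlib
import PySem

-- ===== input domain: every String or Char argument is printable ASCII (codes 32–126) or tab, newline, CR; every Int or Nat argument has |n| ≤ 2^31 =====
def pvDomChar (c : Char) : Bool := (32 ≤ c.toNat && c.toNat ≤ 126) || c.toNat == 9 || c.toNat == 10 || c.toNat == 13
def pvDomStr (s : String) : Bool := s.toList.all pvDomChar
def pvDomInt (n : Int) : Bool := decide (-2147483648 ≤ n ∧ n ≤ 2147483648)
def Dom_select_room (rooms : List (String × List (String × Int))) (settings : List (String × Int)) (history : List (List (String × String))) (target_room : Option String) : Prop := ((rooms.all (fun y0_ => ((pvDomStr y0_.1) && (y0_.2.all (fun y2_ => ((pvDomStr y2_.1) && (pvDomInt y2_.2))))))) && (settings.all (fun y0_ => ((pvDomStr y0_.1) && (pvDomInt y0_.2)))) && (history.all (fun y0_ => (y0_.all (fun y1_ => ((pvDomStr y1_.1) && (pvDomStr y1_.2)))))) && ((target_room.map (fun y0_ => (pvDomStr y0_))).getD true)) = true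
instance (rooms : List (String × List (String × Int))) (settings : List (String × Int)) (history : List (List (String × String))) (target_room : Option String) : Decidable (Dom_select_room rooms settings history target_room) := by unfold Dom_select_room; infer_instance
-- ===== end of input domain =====

-- B replaces A's sort-then-scan by a single pass over rooms keeping the best (strictly smaller
-- priority) non-blocked room, with the blocked test done by one backward walk over the history
-- (objective: alternative decomposition, same exact result).

-- ===== PORT A =====
-- r.get("status") in ("discard", "crash", "timeout")  (same test in A and in B's _blocked)
def pvStatusBad (r : List (String × String)) : Bool :=
  let s := (PySem.Dict.mk r).get? "status"
  s == some "discard" || s == some "crash" || s == some "timeout"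

-- the 'for room_name, room_cfg in sorted_rooms' loop (continue / return / fall-through)
def pvLoopA (history : List (List (String × String))) :
    List (String × List (String × Int)) → Option String
  | [] => none
  | (room_name, _room_cfg) :: rest =>
      let room_history := history.filter (fun r => (PySem.Dict.mk r).get? "room" == some room_name)
      let recent := if room_history.isEmpty then [] else PySem.List.slice room_history (some (-5)) none
      if decide (5 ≤ recent.length) && recent.all pvStatusBad then
        pvLoopA history rest
      else some room_name

def select_room (rooms : List (String × List (String × Int))) (settings : List (String × Int)) (history : List (List (String × String))) (target_room : Option String) : Option String :=
  let body :=
    let sorted_rooms := PySem.List.sorted rooms (fun x => (PySem.Dict.mk x.2).getD "priority" 99) false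
    pvLoopA history sorted_rooms
  match target_room with
  | some t => if !(t == "") && (PySem.Dict.mk rooms).contains t then some t else body
  | none => body

-- ===== PORT B =====
-- the 'for r in reversed(history)' loop of _blocked, with the running counter 'seen'
def pvBlockedGo (room_name : String) : List (List (String × String)) → Nat → Bool
  | [], _ => false
  | r :: t, seen =>
      if (PySem.Dict.mk r).get? "room" == some room_name then
        if !(pvStatusBad r) then false
        else if seen + 1 == 5 then true
        else pvBlockedGo room_name t (seen + 1)
      else pvBlockedGo room_name t seen

def pvBlocked (room_name : String) (history : List (List (String × String))) : Bool :=
  pvBlockedGo room_name history.reverse 0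

def select_room_alt (rooms : List (String × List (String × Int))) (settings : List (String × Int)) (history : List (List (String × String))) (target_room : Option String) : Option String :=
  let body :=
    let best := rooms.foldl (fun best p =>
      if pvBlocked p.1 history then best
      else
        let prio := (PySem.Dict.mk p.2).getD "priority" 99
        match best with
        | none => some (p.1, prio)
        | some b => if prio < b.2 then some (p.1, prio) else best) none
    best.map Prod.fst
  match target_room with
  | some t => if !(t == "") && (PySem.Dict.mk rooms).contains t then some t else body
  | none => body

-- ===== PRECONDITION & SPEC =====
def Spec_select_room (rooms : List (String × List (String × Int))) (settings : List (String × Int)) (history : List (List (String × String))) (target_room : Option String) (out : Option String) : Prop := out = select_room_alt rooms settings history target_room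
instance (rooms : List (String × List (String × Int))) (settings : List (String × Int)) (history : List (List (String × String))) (target_room : Option String) (out : Option String) : Decidable (Spec_select_room rooms settings history target_room out) := by unfold Spec_select_room; infer_instance

-- ===== CLAIM (what is proved, stated in full; the proofs are below) =====
def Claim_equal_select_room : Prop := ∀ (rooms : List (String × List (String × Int))) (settings : List (String × Int)) (history : List (List (String × String))) (target_room : Option String), Dom_select_room rooms settings history target_room → Spec_select_room rooms settings history target_room (select_room rooms settings history target_room)

-- ===== LEMMAS AND PROOFS =====

-- A's per-room "blocked" boolean, extracted from pvLoopA's body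
def pvCondA (history : List (List (String × String))) (room_name : String) : Bool :=
  let room_history := history.filter (fun r => (PySem.Dict.mk r).get? "room" == some room_name)
  let recent := if room_history.isEmpty then [] else PySem.List.slice room_history (some (-5)) none
  decide (5 ≤ recent.length) && recent.all pvStatusBad

-- B's one-step best update, on (name, priority)-less abstract elements
def pvStep {α : Type} (key : α → Int) (p : α → Bool) (b : Option α) (x : α) : Option α :=
  if p x then
    match b with
    | none => some x
    | some b0 => if key x < key b0 then some x else b
  else b

-- A's scan is find? over the sorted list
theorem pvLoopA_eq_find? (history : List (List (String × String)))
    (l : List (String × List (String × Int))) :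
    pvLoopA history l = (l.find? (fun x => !pvCondA history x.1)).map Prod.fst := by
  induction l with
  | nil => rfl
  | cons x rest ih =>
    obtain ⟨n, c⟩ := x
    show (if pvCondA history n = true then pvLoopA history rest else some n)
        = (((n, c) :: rest).find? (fun x => !pvCondA history x.1)).map Prod.fst
    cases hc : pvCondA history n with
    | true => simp [hc, ih]
    | false => simp [hc]

-- B's backward walk, restricted to the already-filtered history
def pvGoC : List (List (String × String)) → Nat → Bool
  | [], _ => false
  | r :: t, seen =>
      if !(pvStatusBad r) then false
      else if seen + 1 == 5 then true
      else pvGoC t (seen + 1)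

theorem pvBlockedGo_eq_goC (name : String) :
    ∀ (l : List (List (String × String))) (seen : Nat),
      pvBlockedGo name l seen =
        pvGoC (l.filter (fun r => (PySem.Dict.mk r).get? "room" == some name)) seen := by
  intro l
  induction l with
  | nil => intro seen; rfl
  | cons r t ih =>
    intro seen
    by_cases h : ((PySem.Dict.mk r).get? "room" == some name) = true
    · rw [List.filter_cons, if_pos h]
      simp only [pvBlockedGo, h, pvGoC]
      split_ifs <;> simp [ih]
    · simp [pvBlockedGo, h, ih]

theorem pvGoC_eq (m : List (List (String × String))) :
    ∀ seen : Nat, seen < 5 →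
      pvGoC m seen = ((m.take (5 - seen)).all pvStatusBad && decide (5 - seen ≤ m.length)) := by
  induction m with
  | nil => intro seen h; simp [pvGoC]; omega
  | cons r t ih =>
    intro seen h
    have hsub : 5 - seen = (5 - (seen + 1)) + 1 := by omega
    by_cases hb : pvStatusBad r = true
    · by_cases h5 : seen + 1 = 5
      · have h0 : 5 - seen = 1 := by omega
        rw [pvGoC, if_neg (by simp [hb]), if_pos (by simp [h5]), h0]
        simp [hb]
      · have hlt : seen + 1 < 5 := by omega
        rw [pvGoC, if_neg (by simp [hb]), if_neg (by simp; omega), ih (seen + 1) hlt, hsub]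
        simp only [List.take_succ_cons, List.all_cons, hb, Bool.true_and, List.length_cons]
        rw [decide_eq_decide.mpr
          (show 5 - (seen + 1) ≤ t.length ↔ 5 - (seen + 1) + 1 ≤ t.length + 1 by omega)]
    · have hb' : pvStatusBad r = false := by simpa using hb
      rw [pvGoC, if_pos (by simp [hb']), hsub]
      simp [List.take_succ_cons, hb']

-- the two "blocked" predicates agree
theorem blocked_eq (history : List (List (String × String))) (name : String) :
    pvCondA history name = pvBlocked name history := by
  unfold pvCondA pvBlocked
  rw [pvBlockedGo_eq_goC, List.filter_reverse, pvGoC_eq _ 0 (by omega)]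
  simp only [Nat.sub_zero, List.length_reverse, List.take_reverse, List.all_reverse]
  set rh := history.filter (fun r => (PySem.Dict.mk r).get? "room" == some name) with hrh
  by_cases he : rh.isEmpty
  · have h0 : rh = [] := List.isEmpty_iff.mp he
    rw [if_pos he]
    simp [h0]
  · rw [if_neg he, PySem.List.slice_from_neg_ofNat rh 5 (by omega)]
    by_cases hlen : 5 ≤ rh.length
    · have e1 : decide (5 ≤ (List.drop (rh.length - 5) rh).length) = true := by
        simp only [List.length_drop, decide_eq_true_eq]; omega
      have e2 : decide (5 ≤ rh.length) = true := by simpa using hlen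
      rw [e1, e2, Bool.true_and, Bool.and_true]
    · have e1 : decide (5 ≤ (List.drop (rh.length - 5) rh).length) = false := by
        simp only [List.length_drop, decide_eq_false_iff_not]; omega
      have e2 : decide (5 ≤ rh.length) = false := by simpa using hlen
      rw [e1, e2, Bool.false_and, Bool.and_false]

-- inserting x into a key-sorted list and taking the first eligible element = one best-update step
theorem find?_insertBy {α : Type} (key : α → Int) (p : α → Bool) (x : α) :
    ∀ s : List α, s.Pairwise (fun a b => key a ≤ key b) →
      (PySem.List.insertBy (fun a b => decide (key a < key b)) x s).find? p =
        pvStep key p (s.find? p) x := by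
  intro s
  induction s with
  | nil =>
    intro _
    by_cases hpx : p x = true <;> simp [PySem.List.insertBy, pvStep, List.find?, hpx]
  | cons y ys ih =>
    intro hp
    rw [List.pairwise_cons] at hp
    by_cases hlt : key x < key y
    · rw [show PySem.List.insertBy (fun a b => decide (key a < key b)) x (y :: ys) = x :: y :: ys
         from by simp [PySem.List.insertBy, hlt]]
      by_cases hpx : p x = true
      · rw [List.find?_cons_of_pos hpx]
        unfold pvStep
        rw [if_pos hpx]
        cases hfind : (y :: ys).find? p with
        | none => rfl
        | some b0 =>
          have hb0 : b0 ∈ y :: ys := List.mem_of_find?_eq_some hfind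
          have hyb : key y ≤ key b0 := by
            rcases List.mem_cons.mp hb0 with h | h
            · simp [h]
            · exact hp.1 b0 h
          have hxb : key x < key b0 := lt_of_lt_of_le hlt hyb
          simp [hxb]
      · rw [List.find?_cons_of_neg (by simpa using hpx)]
        unfold pvStep
        rw [if_neg hpx]
    · rw [show PySem.List.insertBy (fun a b => decide (key a < key b)) x (y :: ys)
            = y :: PySem.List.insertBy (fun a b => decide (key a < key b)) x ys
         from by simp [PySem.List.insertBy, hlt]]
      by_cases hpy : p y = true
      · rw [List.find?_cons_of_pos hpy, List.find?_cons_of_pos hpy]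
        simp [pvStep, hlt]
      · rw [List.find?_cons_of_neg (by simpa using hpy),
            List.find?_cons_of_neg (by simpa using hpy)]
        exact ih hp.2

-- first eligible of the stable key-sort = left fold of the best-update step
theorem find?_sorted_eq_foldl {α : Type} (key : α → Int) (p : α → Bool) (l : List α) :
    (PySem.List.sorted l key false).find? p = l.foldl (pvStep key p) none := by
  induction l using List.reverseRecOn with
  | nil => rfl
  | append_singleton l x ih =>
    rw [PySem.List.sorted_eq_foldl_insertBy, List.foldl_append, List.foldl_append]
    simp only [List.foldl_cons, List.foldl_nil]
    rw [← PySem.List.sorted_eq_foldl_insertBy]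
    rw [find?_insertBy key p x _ (PySem.List.sorted_pairwise l key), ih]

-- B's concrete fold is the abstract fold carried through (name, priority) ↦ pair
theorem foldB_eq_map (history : List (List (String × String)))
    (l : List (String × List (String × Int))) :
    ∀ b : Option (String × List (String × Int)),
      l.foldl (fun best p =>
        if pvBlocked p.1 history then best
        else
          let prio := (PySem.Dict.mk p.2).getD "priority" 99
          match best with
          | none => some (p.1, prio)
          | some b => if prio < b.2 then some (p.1, prio) else best)
        (b.map (fun x => (x.1, (PySem.Dict.mk x.2).getD "priority" 99)))
      = (l.foldl (pvStep (fun x => (PySem.Dict.mk x.2).getD "priority" 99)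
                         (fun x => !pvBlocked x.1 history)) b).map
          (fun x => (x.1, (PySem.Dict.mk x.2).getD "priority" 99)) := by
  induction l with
  | nil => intro b; rfl
  | cons x t ih =>
    intro b
    rw [List.foldl_cons, List.foldl_cons]
    have hstep :
        (if pvBlocked x.1 history then (b.map (fun x => (x.1, (PySem.Dict.mk x.2).getD "priority" 99)))
         else
           let prio := (PySem.Dict.mk x.2).getD "priority" 99
           match (b.map (fun x => (x.1, (PySem.Dict.mk x.2).getD "priority" 99))) with
           | none => some (x.1, prio)
           | some b0 => if prio < b0.2 then some (x.1, prio) else (b.map (fun x => (x.1, (PySem.Dict.mk x.2).getD "priority" 99))))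
        = ((pvStep (fun x => (PySem.Dict.mk x.2).getD "priority" 99)
                   (fun x => !pvBlocked x.1 history) b x).map
            (fun x => (x.1, (PySem.Dict.mk x.2).getD "priority" 99))) := by
      by_cases hbk : pvBlocked x.1 history
      · simp [pvStep, hbk]
      · cases b with
        | none => simp [pvStep, hbk]
        | some b0 =>
          by_cases hk : ((PySem.Dict.mk x.2).getD "priority" 99) < ((PySem.Dict.mk b0.2).getD "priority" 99)
          · simp [pvStep, hbk, hk]
          · simp [pvStep, hbk, hk]
    rw [hstep, ih]

-- the sorted-scan of A and the single-pass fold of B pick the same room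
theorem body_eq (rooms : List (String × List (String × Int)))
    (history : List (List (String × String))) :
    pvLoopA history (PySem.List.sorted rooms (fun x => (PySem.Dict.mk x.2).getD "priority" 99) false)
      = (rooms.foldl (fun best p =>
          if pvBlocked p.1 history then best
          else
            let prio := (PySem.Dict.mk p.2).getD "priority" 99
            match best with
            | none => some (p.1, prio)
            | some b => if prio < b.2 then some (p.1, prio) else best) none).map Prod.fst := by
  rw [pvLoopA_eq_find?]
  have hp : (fun x : String × List (String × Int) => !pvCondA history x.1)
      = (fun x : String × List (String × Int) => !pvBlocked x.1 history) := by
    funext x; rw [blocked_eq]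
  rw [hp, find?_sorted_eq_foldl]
  have h2 := foldB_eq_map history rooms none
  simp only [Option.map_none] at h2
  rw [h2, Option.map_map]
  rfl

-- ===== VERDICT (by name: the statement is the Claim_ definition above) =====
theorem select_room_spec : Claim_equal_select_room := by
  intro rooms settings history target_room _
  unfold Spec_select_room select_room select_room_alt
  cases target_room with
  | none => exact body_eq rooms history
  | some t =>
    dsimp only
    split_ifs with h
    · rfl
    · exact body_eq rooms history
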